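-- pv_equiv track=rewrite | github.com/shanss132/FedYoYo | data_loader/tools.py | partition_balance
-- ===== SOURCE A (Python) =====
-- def partition_balance(idxs, num_split: int): #idx：len:13996
--
--     num_per_part, r = len(idxs) // num_split, len(idxs) % num_split #699,16
--     parts = []
--     i, r_used = 0, 0
--     while i < len(idxs):
--         if r_used < r:
--             parts.append(idxs[i:(i + num_per_part + 1)])
--             i += num_per_part + 1
--             r_used += 1
--         else:
--             parts.append(idxs[i:(i + num_per_part)])
--             i += num_per_part
--
--     return parts
-- ===== SOURCE B (Python) =====
-- def partition_balance(idxs, num_split: int):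
--     # Closed-form boundaries: part j spans [j*q + min(j, r), (j+1)*q + min(j+1, r)).
--     # Only the first min(num_split, len(idxs)) parts are non-empty (A emits exactly those).
--     q, r = divmod(len(idxs), num_split)
--     k = min(num_split, len(idxs))
--     return [idxs[j * q + min(j, r):(j + 1) * q + min(j + 1, r)] for j in range(k)]
-- ===== Notes on version B (the rewrite author's own statement) =====
-- stated objective: alternative
-- what changed: Replaces A's accumulator-threaded while loop (running index i and remainder counter r_used) with a closed-form boundary formula j*q+min(j,r) and a single comprehension slicing between consecutive boundaries.
-- outside the precondition, e.g. on partition_balance([], -1): A returns [], B returns []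
import Mathlib
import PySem

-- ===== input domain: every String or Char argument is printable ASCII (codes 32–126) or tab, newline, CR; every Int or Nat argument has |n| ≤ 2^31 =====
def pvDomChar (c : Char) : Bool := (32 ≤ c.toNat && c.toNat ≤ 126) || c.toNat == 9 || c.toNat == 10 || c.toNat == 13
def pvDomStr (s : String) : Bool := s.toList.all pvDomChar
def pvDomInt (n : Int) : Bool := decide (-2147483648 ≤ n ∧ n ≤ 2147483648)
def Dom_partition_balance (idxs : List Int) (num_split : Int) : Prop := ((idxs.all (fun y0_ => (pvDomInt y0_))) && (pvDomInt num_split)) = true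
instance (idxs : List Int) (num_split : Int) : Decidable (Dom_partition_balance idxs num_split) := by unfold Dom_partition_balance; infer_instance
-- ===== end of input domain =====

-- B replaces A's accumulator-threaded while loop by a closed-form boundary formula plus one slicing pass (alternative decomposition, same cost).


-- ===== PORT A =====
-- A's while loop; fuel idxs.length + 1 bounds the iteration count (the loop runs
-- min(num_split, len) ≤ len times under Pre_; outside Pre_ Python raises or diverges).
def pbLoop (idxs : List Int) (q r : Int) : Nat → Int → Int → List (List Int) → List (List Int)
  | 0, _, _, parts => parts
  | fuel + 1, i, r_used, parts =>
    if i < (idxs.length : Int) then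
      if r_used < r then
        pbLoop idxs q r fuel (i + q + 1) (r_used + 1)
          (parts ++ [PySem.List.slice idxs (some i) (some (i + q + 1))])
      else
        pbLoop idxs q r fuel (i + q) r_used
          (parts ++ [PySem.List.slice idxs (some i) (some (i + q))])
    else parts

def partition_balance (idxs : List Int) (num_split : Int) : List (List Int) :=
  let q := PySem.Int.floordiv (idxs.length : Int) num_split
  let r := PySem.Int.mod (idxs.length : Int) num_split
  pbLoop idxs q r (idxs.length + 1) 0 0 []

-- ===== PORT B =====
def partition_balance_alt (idxs : List Int) (num_split : Int) : List (List Int) :=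
  let q := PySem.Int.floordiv (idxs.length : Int) num_split
  let r := PySem.Int.mod (idxs.length : Int) num_split
  let k := min num_split (idxs.length : Int)
  (PySem.List.pyRange 0 k 1).map (fun j =>
    PySem.List.slice idxs (some (j * q + min j r)) (some ((j + 1) * q + min (j + 1) r)))

-- ===== PRECONDITION & SPEC =====
-- Pre_ excludes num_split ≤ 0: num_split = 0 raises ZeroDivisionError, and num_split < 0
-- diverges on any non-empty idxs (the degenerate ([], num_split < 0), where A returns [], is excluded with them).
def Pre_partition_balance (idxs : List Int) (num_split : Int) : Prop := 1 ≤ num_split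
instance (idxs : List Int) (num_split : Int) : Decidable (Pre_partition_balance idxs num_split) := by unfold Pre_partition_balance; infer_instance
def pvWitness_partition_balance : List Int × Int := ([1, 2, 3, 4, 5], 2)

def Spec_partition_balance (idxs : List Int) (num_split : Int) (out : List (List Int)) : Prop := out = partition_balance_alt idxs num_split
instance (idxs : List Int) (num_split : Int) (out : List (List Int)) : Decidable (Spec_partition_balance idxs num_split out) := by unfold Spec_partition_balance; infer_instance

-- ===== CLAIM (what is proved, stated in full; the proofs are below) =====
def Claim_equal_partition_balance : Prop := ∀ (idxs : List Int) (num_split : Int), Dom_partition_balance idxs num_split → Pre_partition_balance idxs num_split → Spec_partition_balance idxs num_split (partition_balance idxs num_split)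

-- ===== LEMMAS AND PROOFS =====

-- boundary formula: start of part j
def pbBound (q r : Int) (j : Nat) : Int := (j : Int) * q + min (j : Int) r

lemma pbBound_lt_iff (q r s : Int) (hs : 1 ≤ s) (hq : 0 ≤ q) (hr0 : 0 ≤ r) (hrs : r < s)
    (j : Nat) : (pbBound q r j < q * s + r) ↔ (j : Int) < min s (q * s + r) := by
  unfold pbBound
  set jz : Int := (j : Int) with hjz
  have hj0 : 0 ≤ jz := by positivity
  constructor
  · intro h
    rw [lt_min_iff]
    constructor
    · by_contra hc
      push_neg at hc
      have hminr : min jz r = r := min_eq_right (by omega)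
      rw [hminr] at h
      nlinarith [mul_le_mul_of_nonneg_right hc hq]
    · by_contra hc
      push_neg at hc
      rcases lt_or_ge jz s with hjs | hjs
      · -- jz < s but jz ≥ n
        rcases eq_or_lt_of_le hq with hq0 | hq1
        · rw [← hq0] at h hc
          simp only [zero_mul, zero_add] at h hc
          omega
        · have : s ≤ jz := by nlinarith
          omega
      · have hminr : min jz r = r := min_eq_right (by omega)
        rw [hminr] at h
        nlinarith [mul_le_mul_of_nonneg_right hjs hq]
  · intro h
    rw [lt_min_iff] at h
    obtain ⟨hjs, hjn⟩ := h
    rcases le_or_gt jz r with hjr | hjr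
    · rw [min_eq_left hjr]
      rcases eq_or_lt_of_le hq with hq0 | hq1
      · rw [← hq0] at hjn ⊢; simp only [zero_mul, zero_add] at hjn ⊢; omega
      · nlinarith [mul_le_mul_of_nonneg_right (by omega : jz + 1 ≤ s) (by omega : (0:Int) ≤ q)]
    · rw [min_eq_right (by omega)]
      nlinarith [mul_le_mul_of_nonneg_right (by omega : jz + 1 ≤ s) (by omega : (0:Int) ≤ q)]

-- the loop, started at boundary j, appends exactly the remaining closed-form chunks
lemma pbLoop_eq (idxs : List Int) (s : Int) (hs : 1 ≤ s)
    (q r : Int) (hq : q = PySem.Int.floordiv (idxs.length : Int) s)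
    (hr : r = PySem.Int.mod (idxs.length : Int) s) :
    ∀ (fuel : Nat) (j : Nat), (min s (idxs.length : Int)).toNat - j ≤ fuel →
    ∀ parts,
      pbLoop idxs q r fuel (pbBound q r j) (min (j : Int) r) parts
        = parts ++ (List.range ((min s (idxs.length : Int)).toNat - j)).map
            (fun t => PySem.List.slice idxs (some (pbBound q r (j + t))) (some (pbBound q r (j + t + 1)))) := by
  have hs0 : (0:Int) < s := by omega
  have hq0 : 0 ≤ q := by
    rw [hq, PySem.Int.floordiv_eq_ediv_of_pos hs0]
    exact Int.ediv_nonneg (by positivity) (by omega)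
  have hr0 : 0 ≤ r := hr ▸ PySem.Int.mod_nonneg _ hs0
  have hrs : r < s := hr ▸ PySem.Int.mod_lt _ hs0
  have hn : q * s + r = (idxs.length : Int) := by
    rw [hq, hr, PySem.Int.floordiv_mul_add_mod]
  set kN : Nat := (min s (idxs.length : Int)).toNat with hkN
  have hkz : (kN : Int) = min s (idxs.length : Int) := by
    rw [hkN]; exact Int.toNat_of_nonneg (le_min (by omega) (by positivity))
  intro fuel
  induction fuel with
  | zero =>
    intro j hfuel parts
    have : kN - j = 0 := by omega
    simp [pbLoop, this]
  | succ fuel ih =>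
    intro j hfuel parts
    rcases Nat.lt_or_ge j kN with hjk | hjk
    · -- loop continues
      have hcond' : (j : Int) < min s (idxs.length : Int) := by
        rw [← hkz]; exact_mod_cast hjk
      have hcond2 : pbBound q r j < (idxs.length : Int) := by
        rw [← hn, pbBound_lt_iff q r s hs hq0 hr0 hrs j, hn]; exact hcond'
      have hsplit : kN - j = (kN - (j + 1)) + 1 := by omega
      have hrange : (List.range (kN - j)).map
            (fun t => PySem.List.slice idxs (some (pbBound q r (j + t))) (some (pbBound q r (j + t + 1))))
          = PySem.List.slice idxs (some (pbBound q r j)) (some (pbBound q r (j + 1)))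
            :: (List.range (kN - (j + 1))).map
              (fun t => PySem.List.slice idxs (some (pbBound q r (j + 1 + t))) (some (pbBound q r (j + 1 + t + 1)))) := by
        rw [hsplit, List.range_succ_eq_map, List.map_cons, List.map_map]
        congr 1
        · apply List.map_congr_left
          intro t _
          have e1 : j + (t + 1) = j + 1 + t := by omega
          have e2 : j + (t + 1) + 1 = j + 1 + t + 1 := by omega
          simp [Function.comp, e1, e2]
      rcases lt_or_ge (j : Int) r with hjr | hjr
      · -- remainder branch: r_used = min j r = j < r
        have hmin : min (j : Int) r = (j : Int) := min_eq_left (by omega)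
        have hnext : pbBound q r j + q + 1 = pbBound q r (j + 1) := by
          unfold pbBound
          have h1 : min (j : Int) r = (j : Int) := hmin
          have h2 : min ((j + 1 : Nat) : Int) r = ((j + 1 : Nat) : Int) := by
            push_cast; rw [min_eq_left (by omega)]
          rw [h1, h2]; push_cast; ring
        have hmin' : min ((j + 1 : Nat) : Int) r = (j : Int) + 1 := by
          push_cast; rw [min_eq_left (by omega)]
        simp only [pbLoop, hmin, if_pos hcond2, if_pos hjr]
        rw [hnext]
        have hIH := ih (j + 1) (by omega) (parts ++ [PySem.List.slice idxs (some (pbBound q r j)) (some (pbBound q r (j + 1)))])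
        rw [hmin'] at hIH
        rw [hIH, hrange]
        simp
      · -- no remainder left: r_used = min j r = r
        have hmin : min (j : Int) r = r := min_eq_right (by omega)
        have hnext : pbBound q r j + q = pbBound q r (j + 1) := by
          unfold pbBound
          have h2 : min ((j + 1 : Nat) : Int) r = r := by
            push_cast; rw [min_eq_right (by omega)]
          rw [hmin, h2]; push_cast; ring
        have hmin' : min ((j + 1 : Nat) : Int) r = r := by
          push_cast; rw [min_eq_right (by omega)]
        simp only [pbLoop, hmin, if_pos hcond2, if_neg (lt_irrefl r)]
        rw [hnext]
        have hIH := ih (j + 1) (by omega) (parts ++ [PySem.List.slice idxs (some (pbBound q r j)) (some (pbBound q r (j + 1)))])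
        rw [hmin'] at hIH
        rw [hIH, hrange]
        simp
    · -- loop stops: pbBound j ≥ n
      have hstop : ¬ pbBound q r j < (idxs.length : Int) := by
        rw [← hn, pbBound_lt_iff q r s hs hq0 hr0 hrs j, hn, ← hkz]
        push_neg
        exact_mod_cast hjk
      have : kN - j = 0 := by omega
      simp [pbLoop, hstop, this]

-- ===== VERDICT (by name: the statement is the Claim_ definition above) =====
theorem partition_balance_spec : Claim_equal_partition_balance := by
  intro idxs num_split _ hpre
  unfold Spec_partition_balance partition_balance partition_balance_alt
  have hs : 1 ≤ num_split := hpre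
  set q := PySem.Int.floordiv (idxs.length : Int) num_split with hq
  set r := PySem.Int.mod (idxs.length : Int) num_split with hr
  set k : Int := min num_split (idxs.length : Int) with hk
  have hk0 : 0 ≤ k := le_min (by omega) (by positivity)
  have hkn : k.toNat ≤ idxs.length := by
    have : k ≤ (idxs.length : Int) := min_le_right _ _
    omega
  have hr0 : 0 ≤ r := PySem.Int.mod_nonneg _ (by omega)
  have h0 : pbBound q r 0 = 0 := by unfold pbBound; push_cast; rw [min_eq_left hr0]; ring
  have hm0 : min ((0 : Nat) : Int) r = 0 := by push_cast; exact min_eq_left hr0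
  have heq := pbLoop_eq idxs num_split hs q r hq hr (idxs.length + 1) 0 (by omega) []
  rw [h0, hm0] at heq
  simp only [Nat.sub_zero, zero_add, List.nil_append] at heq
  show pbLoop idxs q r (idxs.length + 1) 0 0 [] = (PySem.List.pyRange 0 k 1).map
    (fun j => PySem.List.slice idxs (some (j * q + min j r)) (some ((j + 1) * q + min (j + 1) r)))
  rw [heq, PySem.List.pyRange_one]
  simp only [Int.sub_zero, List.map_map]
  apply List.map_congr_left
  intro t ht
  simp only [Function.comp]
  unfold pbBound
  push_cast
  ring_nf
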